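-- pv_equiv track=rewrite | github.com/jechooz/Algorithm | 프로그래머스/0/181935. 홀짝에 따라 다른 값 반환하기/홀짝에 따라 다른 값 반환하기.py | solution
-- ===== SOURCE A (Python) =====
-- def solution(n):
--     answer = 0
--
--     for i in range(1,n+1):
--         if n%2 == 0:
--             if i%2==0:
--                 answer+= i**2
--         else:
--             if i%2==1:
--                 answer+= i
--
--     return answer
--
--     '''다른 풀이
--     def solution(n):
--     if n % 2:  # n이 홀수일 경우
--         return sum(range(1, n+1, 2))  # n 이하의 홀수들의 합을 반환
--     else:  # n이 짝수일 경우
--         return sum([i*i for i in range(2, n+1, 2)])  # n 이하의 짝수들의 제곱의 합을 반환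
--
--
--    n % 2가 0이 아닌 값 (즉, 1이나 -1 등) 일 경우, 조건식은 참(True)으로 간주.이는 n이 홀수일 때와 같은 결과
--    n % 2가 0일 경우, 조건식은 거짓(False)으로 간주됩니다. 이는 n이 짝수인 경우와 같은 결과
--
--     '''
-- ===== SOURCE B (Python) =====
-- def solution(n):
--     if n <= 0:
--         return 0
--     if n % 2:
--         m = (n + 1) // 2
--         return m * m
--     m = n // 2
--     return 2 * m * (m + 1) * (2 * m + 1) // 3
-- ===== Notes on version B (the rewrite author's own statement) =====
-- stated objective: faster
-- what changed: Replaced A's linear loop over the whole range with constant-time closed-form formulas: the square of the odd count for odd n, and the exact even-square-sum formula for even n.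
import Mathlib
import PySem

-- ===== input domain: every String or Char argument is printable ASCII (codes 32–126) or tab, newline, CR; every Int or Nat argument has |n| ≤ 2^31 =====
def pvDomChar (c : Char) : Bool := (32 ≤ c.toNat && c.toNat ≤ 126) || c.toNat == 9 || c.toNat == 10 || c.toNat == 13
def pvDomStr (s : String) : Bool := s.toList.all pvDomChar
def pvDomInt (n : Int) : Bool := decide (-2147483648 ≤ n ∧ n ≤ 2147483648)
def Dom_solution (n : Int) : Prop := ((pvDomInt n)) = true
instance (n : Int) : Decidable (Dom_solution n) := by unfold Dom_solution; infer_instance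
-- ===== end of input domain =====

-- B replaces A's O(n) loop by O(1) closed-form arithmetic formulas (objective: faster).

-- ===== PORT A =====
def stepA (n acc i : Int) : Int :=
  if PySem.Int.mod n 2 == 0 then
    (if PySem.Int.mod i 2 == 0 then acc + i ^ 2 else acc)
  else
    (if PySem.Int.mod i 2 == 1 then acc + i else acc)

def solution (n : Int) : Int :=
  (PySem.List.pyRange 1 (n + 1) 1).foldl (stepA n) 0

-- ===== PORT B =====
def solution_alt (n : Int) : Int :=
  if n ≤ 0 then 0
  else if PySem.Int.mod n 2 ≠ 0 then
    let m := PySem.Int.floordiv (n + 1) 2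
    m * m
  else
    let m := PySem.Int.floordiv n 2
    PySem.Int.floordiv (2 * m * (m + 1) * (2 * m + 1)) 3

-- ===== PRECONDITION & SPEC =====
def Spec_solution (n : Int) (out : Int) : Prop := out = solution_alt n
instance (n : Int) (out : Int) : Decidable (Spec_solution n out) := by unfold Spec_solution; infer_instance

-- ===== CLAIM (what is proved, stated in full; the proofs are below) =====
def Claim_equal_solution : Prop := ∀ (n : Int), Dom_solution n → Spec_solution n (solution n)

-- ===== LEMMAS AND PROOFS =====

def osum (k : ℕ) : Int := (((k + 1) / 2 : ℕ) : Int) ^ 2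
def esq (k : ℕ) : Int :=
  (2 * ((k / 2 : ℕ) : Int) * (((k / 2 : ℕ) : Int) + 1) * (2 * ((k / 2 : ℕ) : Int) + 1)) / 3

lemma loop_eq (k : ℕ) (n : Int) :
    (PySem.List.pyRange 1 ((k : Int) + 1) 1).foldl (stepA n) 0 =
      if (PySem.Int.mod n 2 == 0 : Bool) then esq k else osum k := by
  induction k with
  | zero =>
    rw [PySem.List.pyRange_one_eq_nil (by norm_num)]
    simp [esq, osum]
  | succ k ih =>
    have hsplit : PySem.List.pyRange 1 ((↑(k + 1) : Int) + 1) 1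
        = PySem.List.pyRange 1 ((k : Int) + 1) 1 ++ [(k : Int) + 1] := by
      push_cast
      rw [PySem.List.pyRange_one_succ_right (by omega)]
    have hm : PySem.Int.mod ((k : Int) + 1) 2 = ((k : Int) + 1) % 2 :=
      PySem.Int.mod_eq_emod_of_pos (by norm_num)
    rw [hsplit, List.foldl_append, ih]
    simp only [List.foldl_cons, List.foldl_nil]
    split_ifs with hc
    · simp only [stepA]
      rw [if_pos hc, hm]
      rcases Nat.even_or_odd k with ⟨t, ht⟩ | ⟨t, ht⟩ <;> subst ht
      · have h1 : ((t + t : ℕ) : Int) + 1 = 2 * t + 1 := by push_cast; ring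
        have h2 : (2 * (t : Int) + 1) % 2 = 1 := by omega
        have h3 : (t + t) / 2 = t := by omega
        have h4 : (t + t + 1) / 2 = t := by omega
        rw [h1, if_neg (by rw [h2]; decide)]
        simp [esq, h3, h4]
      · have h1 : ((2 * t + 1 : ℕ) : Int) + 1 = 2 * t + 2 := by push_cast; ring
        have h2 : (2 * (t : Int) + 2) % 2 = 0 := by omega
        have h3 : (2 * t + 1) / 2 = t := by omega
        have h4 : (2 * t + 1 + 1) / 2 = t + 1 := by omega
        rw [h1, if_pos (by rw [h2]; decide)]
        simp only [esq, h3, h4]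
        have key : 2 * ((t + 1 : ℕ) : Int) * (((t + 1 : ℕ) : Int) + 1) * (2 * ((t + 1 : ℕ) : Int) + 1)
            = 2 * ((t : ℕ) : Int) * (((t : ℕ) : Int) + 1) * (2 * ((t : ℕ) : Int) + 1)
              + (2 * (t : Int) + 2) ^ 2 * 3 := by push_cast; ring
        rw [key, Int.add_mul_ediv_right _ _ (by norm_num : (3 : Int) ≠ 0)]
    · simp only [stepA]
      rw [if_neg hc, hm]
      rcases Nat.even_or_odd k with ⟨t, ht⟩ | ⟨t, ht⟩ <;> subst ht
      · have h1 : ((t + t : ℕ) : Int) + 1 = 2 * t + 1 := by push_cast; ring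
        have h2 : (2 * (t : Int) + 1) % 2 = 1 := by omega
        have h3 : (t + t + 1) / 2 = t := by omega
        have h4 : (t + t + 1 + 1) / 2 = t + 1 := by omega
        rw [h1, if_pos (by rw [h2]; decide)]
        simp only [osum, h3, h4]
        push_cast
        ring
      · have h1 : ((2 * t + 1 : ℕ) : Int) + 1 = 2 * t + 2 := by push_cast; ring
        have h2 : (2 * (t : Int) + 2) % 2 = 0 := by omega
        have h3 : (2 * t + 1 + 1) / 2 = t + 1 := by omega
        have h4 : (2 * t + 1 + 1 + 1) / 2 = t + 1 := by omega
        rw [h1, if_neg (by rw [h2]; decide)]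
        simp [osum, h3, h4]

theorem solution_spec : Claim_equal_solution := by
  intro n _
  unfold Spec_solution
  by_cases hn : n ≤ 0
  · unfold solution solution_alt
    rw [PySem.List.pyRange_one_eq_nil (by omega)]
    simp [hn]
  · obtain ⟨k, hk⟩ : ∃ k : ℕ, n = (k : Int) := ⟨n.toNat, (Int.toNat_of_nonneg (by omega : (0:Int) ≤ n)).symm⟩
    subst hk
    unfold solution solution_alt
    rw [loop_eq k]
    rw [if_neg (by omega : ¬ ((k : Int) ≤ 0))]
    have hmod : PySem.Int.mod ((k : Int)) 2 = ((k % 2 : ℕ) : Int) := PySem.Int.mod_natCast k 2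
    by_cases hpar : k % 2 = 0
    · rw [if_pos (by rw [hmod, hpar]; decide), if_neg (by rw [hmod, hpar]; decide)]
      rw [PySem.Int.floordiv_eq_ediv_of_pos (by norm_num : (0:Int) < 2),
          PySem.Int.floordiv_eq_ediv_of_pos (by norm_num : (0:Int) < 3)]
      have hdiv : ((k / 2 : ℕ) : Int) = (k : Int) / 2 := by omega
      rw [esq, hdiv]
    · have hpar1 : k % 2 = 1 := by omega
      rw [if_neg (by rw [hmod, hpar1]; decide), if_pos (by rw [hmod, hpar1]; decide)]
      rw [PySem.Int.floordiv_eq_ediv_of_pos (by norm_num : (0:Int) < 2)]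
      have hdiv : (((k + 1) / 2 : ℕ) : Int) = ((k : Int) + 1) / 2 := by omega
      rw [osum, hdiv]
      ring
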